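-- pv_equiv track=rewrite | github.com/joass1/dlweekhackathon | backend/app/main.py | _resolve_user_concept_id
-- ===== SOURCE A (Python) =====
-- from typing import Dict, Any, Dict, List, Optional
--
-- def _normalize_lookup(value: str) -> str:
--     return "".join(ch for ch in value.lower() if ch.isalnum())
--
-- def _resolve_user_concept_id(raw_concept: str, nodes: List[dict]) -> Optional[str]:
--     if not raw_concept:
--         return None
--
--     exact = next((n for n in nodes if str(n.get("id", "")) == raw_concept), None)
--     if exact:
--         return str(exact.get("id"))
--
--     lookup = _normalize_lookup(raw_concept)
--     if not lookup:
--         return None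
--     for node in nodes:
--         node_id = str(node.get("id", ""))
--         title = str(node.get("title", ""))
--         if _normalize_lookup(node_id) == lookup or _normalize_lookup(title) == lookup:
--             return node_id
--     return None
-- ===== SOURCE B (Python) =====
-- from typing import List, Optional
--
--
-- def _normalize_lookup(value: str) -> str:
--     return "".join(ch for ch in value.lower() if ch.isalnum())
--
--
-- def _resolve_user_concept_id(raw_concept: str, nodes: List[dict]) -> Optional[str]:
--     # Single pass: return an exact id match on sight; remember the first
--     # normalized match as a fallback to return after the loop.
--     if not raw_concept:
--         return None
--     lookup = _normalize_lookup(raw_concept)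
--     fallback = None
--     for node in nodes:
--         node_id = str(node.get("id", ""))
--         if node_id == raw_concept:
--             return node_id
--         if (fallback is None and lookup
--                 and (_normalize_lookup(node_id) == lookup
--                      or _normalize_lookup(str(node.get("title", ""))) == lookup)):
--             fallback = node_id
--     return fallback
-- ===== Notes on version B (the rewrite author's own statement) =====
-- stated objective: alternative
-- what changed: Replaces A's two sequential scans (exact-match scan via next(), then a normalized-match loop) with one loop that returns an exact match on sight and records the first normalized match in a fallback variable returned after the loop.
import Mathlib
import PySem

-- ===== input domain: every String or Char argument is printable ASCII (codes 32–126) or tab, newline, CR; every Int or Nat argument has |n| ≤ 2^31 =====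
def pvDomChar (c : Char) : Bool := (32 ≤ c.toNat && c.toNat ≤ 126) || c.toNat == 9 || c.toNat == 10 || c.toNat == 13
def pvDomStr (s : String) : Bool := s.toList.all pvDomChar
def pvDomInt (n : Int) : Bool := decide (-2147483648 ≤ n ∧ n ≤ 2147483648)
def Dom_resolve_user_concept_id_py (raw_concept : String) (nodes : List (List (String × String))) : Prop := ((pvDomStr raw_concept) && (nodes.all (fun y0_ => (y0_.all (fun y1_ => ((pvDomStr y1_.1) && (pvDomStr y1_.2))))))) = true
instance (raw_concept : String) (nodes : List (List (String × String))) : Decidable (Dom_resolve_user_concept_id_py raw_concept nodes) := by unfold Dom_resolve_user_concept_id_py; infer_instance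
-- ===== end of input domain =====

-- B replaces A's two sequential scans with one loop carrying a fallback accumulator (objective: alternative decomposition, same cost).

-- ===== PORT A =====
-- _normalize_lookup: "".join(ch for ch in value.lower() if ch.isalnum())
def pvNorm (value : String) : String :=
  String.ofList ((PySem.Chars.lower value.toList).filter PySem.Chars.isalnum)

-- str(node.get(k, "")) on a string-valued dict (association list, first match)
def pvGetD (node : List (String × String)) (k d : String) : String :=
  PySem.Dict.getD (PySem.Dict.mk node) k d

-- A's second loop: 'for node in nodes: … if _normalize_lookup(node_id)==lookup or …: return node_id'
def pvA_loop (lookup : String) : List (List (String × String)) → Option String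
  | [] => none
  | node :: rest =>
    let node_id := pvGetD node "id" ""
    let title := pvGetD node "title" ""
    if pvNorm node_id = lookup ∨ pvNorm title = lookup then some node_id
    else pvA_loop lookup rest

-- A's code after the exact-match block: lookup = _normalize_lookup(raw); if not lookup: return None; for-loop
def pvA_fallback (raw_concept : String) (nodes : List (List (String × String))) : Option String :=
  let lookup := pvNorm raw_concept
  if lookup = "" then none else pvA_loop lookup nodes

def resolve_user_concept_id_py (raw_concept : String) (nodes : List (List (String × String))) : Option String :=
  if raw_concept = "" then none
  else
    -- exact = next((n for n in nodes if str(n.get("id","")) == raw_concept), None)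
    match nodes.find? (fun n => pvGetD n "id" "" == raw_concept) with
    | some e =>
      -- 'if exact:' — a found empty dict is falsy; str(exact.get("id")) with str(None) = "None"
      if e = [] then pvA_fallback raw_concept nodes
      else some (match PySem.Dict.get? (PySem.Dict.mk e) "id" with
                 | some v => v
                 | none => "None")
    | none => pvA_fallback raw_concept nodes

-- ===== PORT B =====
-- B's single loop: return exact match on sight, record first normalized match in 'fallback'
def pvB_loop (raw_concept lookup : String) (fallback : Option String) :
    List (List (String × String)) → Option String
  | [] => fallback
  | node :: rest =>
    let node_id := pvGetD node "id" ""
    if node_id = raw_concept then some node_id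
    else
      pvB_loop raw_concept lookup
        (if fallback = none ∧ lookup ≠ "" ∧
            (pvNorm node_id = lookup ∨ pvNorm (pvGetD node "title" "") = lookup)
         then some node_id else fallback) rest

def resolve_user_concept_id_py_alt (raw_concept : String) (nodes : List (List (String × String))) : Option String :=
  if raw_concept = "" then none
  else pvB_loop raw_concept (pvNorm raw_concept) none nodes

-- ===== PRECONDITION & SPEC =====
def Spec_resolve_user_concept_id_py (raw_concept : String) (nodes : List (List (String × String))) (out : Option String) : Prop := out = resolve_user_concept_id_py_alt raw_concept nodes
instance (raw_concept : String) (nodes : List (List (String × String))) (out : Option String) : Decidable (Spec_resolve_user_concept_id_py raw_concept nodes out) := by unfold Spec_resolve_user_concept_id_py; infer_instance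

-- ===== CLAIM (what is proved, stated in full; the proofs are below) =====
def Claim_equal_resolve_user_concept_id_py : Prop := ∀ (raw_concept : String) (nodes : List (List (String × String))), Dom_resolve_user_concept_id_py raw_concept nodes → Spec_resolve_user_concept_id_py raw_concept nodes (resolve_user_concept_id_py raw_concept nodes)

-- ===== LEMMAS AND PROOFS =====

-- B's loop, characterised: exact hit anywhere gives back raw_concept itself; otherwise a pre-set
-- fallback wins, else A's normalized scan over the whole list.
lemma pvB_loop_eq (raw_concept lookup : String)
    (nodes : List (List (String × String))) (fb : Option String) :
    pvB_loop raw_concept lookup fb nodes =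
      match nodes.find? (fun n => pvGetD n "id" "" == raw_concept) with
      | some _ => some raw_concept
      | none =>
        match fb with
        | some x => some x
        | none => if lookup = "" then none else pvA_loop lookup nodes := by
  induction nodes generalizing fb with
  | nil =>
    cases fb with
    | some x => simp [pvB_loop]
    | none =>
      by_cases hl : lookup = "" <;> simp [pvB_loop, pvA_loop, hl]
  | cons node rest ih =>
    by_cases h : pvGetD node "id" "" = raw_concept
    · simp [pvB_loop, h, List.find?_cons_of_pos, BEq.rfl]
    · have hfind : (node :: rest).find? (fun n => pvGetD n "id" "" == raw_concept)
          = rest.find? (fun n => pvGetD n "id" "" == raw_concept) := by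
        rw [List.find?_cons_of_neg]
        simpa using h
      rw [hfind]
      simp only [pvB_loop, if_neg h]
      rw [ih]
      cases hrest : rest.find? (fun n => pvGetD n "id" "" == raw_concept) with
      | some e => simp
      | none =>
        cases fb with
        | some x => simp
        | none =>
          by_cases hl : lookup = ""
          · simp [hl]
          · by_cases hc : pvNorm (pvGetD node "id" "") = lookup ∨
                pvNorm (pvGetD node "title" "") = lookup
            · simp [hl, hc, pvA_loop]
            · simp [hl, hc, pvA_loop]

-- ===== VERDICT (by name: the statement is the Claim_ definition above) =====
theorem resolve_user_concept_id_py_spec : Claim_equal_resolve_user_concept_id_py := by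
  intro raw_concept nodes _
  unfold Spec_resolve_user_concept_id_py
  by_cases hraw : raw_concept = ""
  · simp [resolve_user_concept_id_py, resolve_user_concept_id_py_alt, hraw]
  · simp only [resolve_user_concept_id_py, resolve_user_concept_id_py_alt, if_neg hraw]
    rw [pvB_loop_eq]
    cases hfind : nodes.find? (fun n => pvGetD n "id" "" == raw_concept) with
    | none => simp [pvA_fallback]
    | some e =>
      have hpred : pvGetD e "id" "" = raw_concept := by
        simpa using List.find?_some hfind
      cases hg : PySem.Dict.get? (PySem.Dict.mk e) "id" with
      | none =>
        exfalso
        apply hraw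
        rw [← hpred]
        simp [pvGetD, PySem.Dict.getD, hg]
      | some v =>
        have hv : v = raw_concept := by
          rw [← hpred]
          simp [pvGetD, PySem.Dict.getD, hg]
        have hne : e ≠ [] := by
          intro he
          subst he
          simp [PySem.Dict.get?] at hg
        simp [hne, hg, hv]
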